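-- pv_equiv track=rewrite | github.com/DKL1231/CodingTest | 프로그래머스/unrated/181829. 이차원 배열 대각선 순회하기/이차원 배열 대각선 순회하기.py | solution
-- ===== SOURCE A (Python) =====
-- def solution(board, k):
--     answer = 0
--     for i in range(k+1):
--         for j in range(i+1):
--             try:
--                 answer += board[j][i-j]
--             except:
--                 pass
--     return answer
-- ===== SOURCE B (Python) =====
-- def solution(board, k):
--     total = 0
--     for r, row in enumerate(board):
--         for c, v in enumerate(row):
--             if r + c <= k:
--                 total += v
--     return total
-- ===== Notes on version B (the rewrite author's own statement) =====
-- stated objective: faster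
-- what changed: B scans the board's real cells once in row-major order with enumerate and adds those with r+c <= k, instead of A's double loop over all O(k^2) diagonal index pairs range(k+1) x range(i+1) probing board[j][i-j] under try/except.
import Mathlib
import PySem

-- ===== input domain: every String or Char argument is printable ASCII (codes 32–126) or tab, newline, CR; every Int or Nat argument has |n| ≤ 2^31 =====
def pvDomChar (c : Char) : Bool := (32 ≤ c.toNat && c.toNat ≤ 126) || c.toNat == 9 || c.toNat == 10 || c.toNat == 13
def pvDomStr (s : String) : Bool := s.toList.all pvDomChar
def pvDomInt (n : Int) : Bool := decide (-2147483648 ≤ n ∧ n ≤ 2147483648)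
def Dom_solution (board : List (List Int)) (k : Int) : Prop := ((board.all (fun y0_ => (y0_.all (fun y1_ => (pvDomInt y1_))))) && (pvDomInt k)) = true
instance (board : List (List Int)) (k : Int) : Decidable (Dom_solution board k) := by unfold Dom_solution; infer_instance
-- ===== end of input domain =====

-- B sums the board's real cells row-major (enumerate, condition r+c ≤ k) instead of A's
-- diagonal-index double loop over all O(k^2) pairs with try/except-guarded board[j][i-j]; objective: faster (measured).

-- ===== PORT A =====
def solution (board : List (List Int)) (k : Int) : Int :=
  (PySem.List.pyRange 0 (k + 1) 1).foldl (fun answer i =>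
    (PySem.List.pyRange 0 (i + 1) 1).foldl (fun answer j =>
      -- try: answer += board[j][i-j]  except: pass
      match (PySem.List.pyGet? board j).bind (fun row => PySem.List.pyGet? row (i - j)) with
      | some v => answer + v
      | none => answer) answer) 0

-- ===== PORT B =====
def solution_alt (board : List (List Int)) (k : Int) : Int :=
  (PySem.List.enumerate board 0).foldl (fun total rc =>
    (PySem.List.enumerate rc.2 0).foldl (fun total cv =>
      if rc.1 + cv.1 ≤ k then total + cv.2 else total) total) 0

-- ===== PRECONDITION & SPEC =====
def Spec_solution (board : List (List Int)) (k : Int) (out : Int) : Prop := out = solution_alt board k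
instance (board : List (List Int)) (k : Int) (out : Int) : Decidable (Spec_solution board k out) := by unfold Spec_solution; infer_instance

-- ===== CLAIM (what is proved, stated in full; the proofs are below) =====
def Claim_equal_solution : Prop := ∀ (board : List (List Int)) (k : Int), Dom_solution board k → Spec_solution board k (solution board k)

-- ===== LEMMAS AND PROOFS =====

/-- the element added for cell (r, c) (0 when out of range). -/
def pvCell (board : List (List Int)) (r c : Nat) : Int :=
  ((board.getD r [])[c]?).getD 0

theorem pv_cell_ite (board : List (List Int)) (r c : Nat) :
    pvCell board r c
      = if c < (board.getD r []).length then (board.getD r []).getD c 0 else 0 := by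
  unfold pvCell
  rcases Nat.lt_or_ge c (board.getD r []).length with h | h
  · rw [if_pos h]
    exact List.getD_eq_getElem?_getD.symm
  · rw [if_neg (by omega), List.getElem?_eq_none (by omega : (board.getD r []).length ≤ c)]
    rfl

theorem pv_list_sum (n : Nat) (f : Nat → Int) :
    ((List.range n).map f).sum = ∑ i ∈ Finset.range n, f i := by
  induction n with
  | zero => simp
  | succ n ih =>
      rw [List.range_succ, List.map_append, List.sum_append, Finset.sum_range_succ, ih]
      simp

theorem pv_cell_cast (board : List (List Int)) (t s : Nat) (hs : s ≤ t) :
    ((PySem.List.pyGet? board (s : Int)).bind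
        (fun row => PySem.List.pyGet? row ((t : Int) - (s : Int)))).getD 0
      = pvCell board s (t - s) := by
  have h1 : (t : Int) - (s : Int) = ((t - s : Nat) : Int) := by omega
  rw [h1, PySem.List.pyGet?_natCast]
  rcases Nat.lt_or_ge s board.length with h | h
  · simp [List.getElem?_eq_getElem h, pvCell, List.getD_eq_getElem?_getD]
  · simp [List.getElem?_eq_none (by omega : board.length ≤ s), pvCell]

/-- `∑ c < A, if c < B then h c else 0` truncates the range. -/
theorem pv_sum_range_ite_lt (A B : Nat) (h : Nat → Int) :
    ∑ c ∈ Finset.range A, (if c < B then h c else 0) = ∑ c ∈ Finset.range (min A B), h c := by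
  rw [← Finset.sum_filter]
  congr 1
  ext c
  simp only [Finset.mem_filter, Finset.mem_range, Finset.mem_range, lt_min_iff]

/-- triangle reindexing: diagonal-by-diagonal = row-by-row. -/
theorem pv_tri (g : Nat → Nat → Int) (K : Nat) :
    ∑ i ∈ Finset.range K, ∑ j ∈ Finset.range (i + 1), g j (i - j)
      = ∑ r ∈ Finset.range K, ∑ c ∈ Finset.range (K - r), g r c := by
  induction K with
  | zero => simp
  | succ K ih =>
      rw [Finset.sum_range_succ, ih,
        Finset.sum_range_succ (f := fun r => ∑ c ∈ Finset.range (K + 1 - r), g r c),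
        Finset.sum_range_succ (f := fun j => g j (K - j))]
      have h1 : ∀ r ∈ Finset.range K,
          ∑ c ∈ Finset.range (K + 1 - r), g r c
            = (∑ c ∈ Finset.range (K - r), g r c) + g r (K - r) := by
        intro r hr
        have hr' : K + 1 - r = (K - r) + 1 := by
          simp only [Finset.mem_range] at hr; omega
        rw [hr', Finset.sum_range_succ]
      rw [Finset.sum_congr rfl h1, Finset.sum_add_distrib]
      simp
      ring

/-- extend an outer sum when the summand vanishes beyond n. -/
theorem pv_sum_range_extend (n N : Nat) (hn : n ≤ N) (h : Nat → Int)
    (hz : ∀ r, n ≤ r → h r = 0) :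
    ∑ r ∈ Finset.range n, h r = ∑ r ∈ Finset.range N, h r := by
  refine Finset.sum_subset (by intro x hx; simp only [Finset.mem_range] at *; omega) ?_
  intro r _ hr
  exact hz r (by simpa using hr)

theorem pv_A_eq (board : List (List Int)) (k : Int) :
    solution board k
      = ∑ i ∈ Finset.range (k + 1).toNat, ∑ j ∈ Finset.range (i + 1), pvCell board j (i - j) := by
  unfold solution
  have hmatch : ∀ (a : Int) (o : Option Int),
      (match o with | some v => a + v | none => a) = a + o.getD 0 := by
    intro a o; cases o <;> simp
  simp only [hmatch, PySem.List.foldl_add, PySem.List.pyRange_one, List.map_map,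
    zero_add, sub_zero]
  rw [pv_list_sum]
  refine Finset.sum_congr rfl ?_
  intro t ht
  simp only [Function.comp_apply]
  have hb : ((t : Int) + 1).toNat = t + 1 := by omega
  rw [hb, pv_list_sum]
  refine Finset.sum_congr rfl ?_
  intro s hs
  simp only [Function.comp_apply, Finset.mem_range] at *
  exact pv_cell_cast board t s (by omega)

theorem pv_B_eq (board : List (List Int)) (k : Int) :
    solution_alt board k
      = ∑ r ∈ Finset.range board.length, ∑ c ∈ Finset.range (board.getD r []).length,
          (if (r : Int) + (c : Int) ≤ k then (board.getD r []).getD c 0 else 0) := by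
  unfold solution_alt
  have hif : ∀ (c : Prop) [Decidable c] (a v : Int),
      (if c then a + v else a) = a + (if c then v else 0) := by
    intro c _ a v; split <;> simp
  simp only [hif, PySem.List.foldl_add, zero_add]
  rw [PySem.List.enumerate_eq_map_pyRange (d := [])]
  simp only [PySem.List.pyRange_one, List.map_map, zero_add, sub_zero, Int.toNat_natCast,
    PySem.List.len_eq]
  rw [pv_list_sum]
  refine Finset.sum_congr rfl ?_
  intro r hr
  simp only [Function.comp_apply, PySem.List.pyGetD_natCast]
  rw [PySem.List.enumerate_eq_map_pyRange (d := 0)]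
  simp only [PySem.List.pyRange_one, List.map_map, zero_add, sub_zero, Int.toNat_natCast,
    PySem.List.len_eq]
  rw [pv_list_sum]
  refine Finset.sum_congr rfl ?_
  intro c hc
  simp only [Function.comp_apply, PySem.List.pyGetD_natCast]

-- ===== VERDICT (by name: the statement is the Claim_ definition above) =====
theorem solution_spec : Claim_equal_solution := by
  intro board k _
  unfold Spec_solution
  rw [pv_A_eq, pv_B_eq, pv_tri]
  have hL : ∀ r : Nat, board.length ≤ r → (board.getD r []).length = 0 := by
    intro r hr; rw [List.getD_eq_default _ _ hr]; rfl
  have hleft : ∀ r : Nat,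
      ∑ c ∈ Finset.range ((k + 1).toNat - r), pvCell board r c
        = ∑ c ∈ Finset.range (min ((k + 1).toNat - r) (board.getD r []).length),
            (board.getD r []).getD c 0 := by
    intro r
    rw [Finset.sum_congr rfl (fun c _ => pv_cell_ite board r c), pv_sum_range_ite_lt]
  have hright : ∀ r : Nat,
      ∑ c ∈ Finset.range (board.getD r []).length,
          (if (r : Int) + (c : Int) ≤ k then (board.getD r []).getD c 0 else 0)
        = ∑ c ∈ Finset.range (min ((k + 1).toNat - r) (board.getD r []).length),
            (board.getD r []).getD c 0 := by
    intro r
    have hiff : ∀ c : Nat, ((r : Int) + (c : Int) ≤ k) ↔ (c < (k + 1).toNat - r) := by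
      intro c; omega
    rw [Finset.sum_congr rfl
        (fun c _ => by rw [if_congr (hiff c) rfl rfl]), pv_sum_range_ite_lt,
      Nat.min_comm]
  rw [Finset.sum_congr rfl (fun r _ => hleft r),
    Finset.sum_congr rfl (fun r _ => hright r),
    pv_sum_range_extend (k + 1).toNat (max (k + 1).toNat board.length) (le_max_left _ _)
      _ (by intro r hr; rw [Nat.sub_eq_zero_of_le hr]; simp),
    pv_sum_range_extend board.length (max (k + 1).toNat board.length) (le_max_right _ _)
      _ (by intro r hr; rw [hL r hr]; simp)]
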